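-- pv_equiv track=rewrite | github.com/pypi-data/pypi-mirror-69 | packages/PacketStats/PacketStats-1.1-py2.py3-none-any.whl/PacketStats/statistics.py | non_increasing
-- ===== SOURCE A (Python) =====
-- def non_increasing(values, length):
--     if length == 1:
--         for value in values:
--             yield value,
--     else:
--         for index, value in enumerate(values, 1):
--             for rest in non_increasing(values[:index], length - 1):
--                 yield (value,) + rest
-- ===== SOURCE B (Python) =====
-- def non_increasing(values, length):
--     # Iterative level-by-level expansion of index tuples instead of recursion.
--     tuples = [(i,) for i in range(len(values))]
--     for _ in range(length - 1):
--         tuples = [t + (i,) for t in tuples for i in range(t[-1] + 1)]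
--     for t in tuples:
--         yield tuple(values[i] for i in t)
-- ===== Notes on version B (the rewrite author's own statement) =====
-- stated objective: alternative
-- what changed: Replaces A's recursion on length (which re-slices the value list at every level) by an iterative breadth-first expansion: the list of non-increasing index tuples is built level by level with one flat loop, then mapped through values once.
import Mathlib
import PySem

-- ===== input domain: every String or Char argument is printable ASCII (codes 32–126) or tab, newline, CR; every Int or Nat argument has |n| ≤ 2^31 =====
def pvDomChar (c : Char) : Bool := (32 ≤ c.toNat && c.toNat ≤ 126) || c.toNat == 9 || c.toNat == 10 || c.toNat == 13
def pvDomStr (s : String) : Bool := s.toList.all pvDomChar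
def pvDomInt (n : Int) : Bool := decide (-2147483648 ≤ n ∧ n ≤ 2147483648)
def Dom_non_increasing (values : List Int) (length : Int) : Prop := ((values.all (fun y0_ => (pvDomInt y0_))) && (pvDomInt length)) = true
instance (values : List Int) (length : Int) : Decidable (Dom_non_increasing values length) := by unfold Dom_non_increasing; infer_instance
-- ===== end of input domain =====

-- B replaces A's recursion-on-length (with list slicing) by an iterative level-by-level
-- expansion of index tuples; return-value equivalence on Pre_ (both are generators in Python,
-- compared as the list of yielded tuples).

-- ===== PORT A =====
def non_increasing (values : List Int) (length : Int) : List (List Int) :=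
  if length = 1 then
    values.map (fun v => [v])
  else if length ≤ 1 then []
    -- totality guard: Python recurses forever here (excluded by Pre_ unless values = [],
    -- where Python's loop over enumerate([]) yields nothing, i.e. [] as well)
  else
    (PySem.List.enumerate values 1).flatMap (fun iv =>
      (non_increasing (PySem.List.slice values none (some iv.1)) (length - 1)).map
        (fun rest => iv.2 :: rest))
termination_by length.toNat
decreasing_by omega

-- ===== PORT B =====
def non_increasing_alt (values : List Int) (length : Int) : List (List Int) :=
  -- tuples = [(i,) for i in range(len(values))]
  let t0 : List (List Nat) := (List.range values.length).map (fun i => [i])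
  -- for _ in range(length - 1): tuples = [t + (i,) for t in tuples for i in range(t[-1] + 1)]
  -- (t is never empty when read, so t[-1] is exactly getLast!)
  let tuples := (PySem.List.pyRange 0 (length - 1) 1).foldl
      (fun ts _ => ts.flatMap (fun t => (List.range (t.getLast! + 1)).map (fun i => t ++ [i]))) t0
  -- yield tuple(values[i] for i in t)   (every i is in range, so values[i] = getD i 0)
  tuples.map (fun t => t.map (fun i => values.getD i 0))

-- ===== PRECONDITION & SPEC =====
-- Pre_ excludes only length ≤ 0 with nonempty values, where the Python A raises RecursionError.
def Pre_non_increasing (values : List Int) (length : Int) : Prop := 1 ≤ length ∨ values = []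
instance (values : List Int) (length : Int) : Decidable (Pre_non_increasing values length) := by
  unfold Pre_non_increasing; infer_instance
def pvWitness_non_increasing : List Int × Int := ([2, 5, 5], 2)

def Spec_non_increasing (values : List Int) (length : Int) (out : List (List Int)) : Prop := out = non_increasing_alt values length
instance (values : List Int) (length : Int) (out : List (List Int)) : Decidable (Spec_non_increasing values length out) := by unfold Spec_non_increasing; infer_instance

-- ===== CLAIM (what is proved, stated in full; the proofs are below) =====
def Claim_equal_non_increasing : Prop := ∀ (values : List Int) (length : Int), Dom_non_increasing values length → Pre_non_increasing values length → Spec_non_increasing values length (non_increasing values length)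

-- ===== LEMMAS AND PROOFS =====

-- pvT n k : the lexicographic list of non-increasing index tuples of length k+1 over range n.
def pvT (n : Nat) : Nat → List (List Nat)
  | 0 => (List.range n).map (fun i => [i])
  | k + 1 => (List.range n).flatMap (fun i => (pvT (i + 1) k).map (fun t => i :: t))

-- B's loop body.
def pvStep (ts : List (List Nat)) : List (List Nat) :=
  ts.flatMap (fun t => (List.range (t.getLast! + 1)).map (fun i => t ++ [i]))

lemma pvT_ne_nil {n k : Nat} {t : List Nat} (h : t ∈ pvT n k) : t ≠ [] := by
  cases k with
  | zero => simp [pvT] at h; obtain ⟨i, _, rfl⟩ := h; simp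
  | succ k => simp [pvT] at h; obtain ⟨i, _, r, _, rfl⟩ := h; simp

lemma pvT_lt {n k : Nat} {t : List Nat} (h : t ∈ pvT n k) : ∀ x ∈ t, x < n := by
  induction k generalizing n t with
  | zero => simp [pvT] at h; obtain ⟨i, hi, rfl⟩ := h; simpa using hi
  | succ k ih =>
    simp [pvT] at h; obtain ⟨i, hi, r, hr, rfl⟩ := h
    intro x hx
    rcases List.mem_cons.mp hx with rfl | hx
    · exact hi
    · exact lt_of_lt_of_le (ih hr x hx) hi

lemma pvGetLast?_cons {i : Nat} {t : List Nat} (h : t ≠ []) : (i :: t).getLast? = t.getLast? := by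
  cases t with
  | nil => exact absurd rfl h
  | cons a s => simp [List.getLast?_cons_cons]

lemma pvStep_map_cons (i : Nat) (l : List (List Nat)) (hl : ∀ t ∈ l, t ≠ []) :
    pvStep (l.map (fun t => i :: t)) = (pvStep l).map (fun t => i :: t) := by
  unfold pvStep
  rw [List.flatMap_map, List.map_flatMap]
  apply List.flatMap_congr
  intro t ht
  rw [List.map_map]
  have h1 : (i :: t).getLast! = t.getLast! := by
    simp [List.getLast!_eq_getLast?_getD, pvGetLast?_cons (hl t ht)]
  rw [h1]
  rfl

lemma pvStep_pvT (n k : Nat) : pvStep (pvT n k) = pvT n (k + 1) := by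
  induction k generalizing n with
  | zero =>
    show pvStep ((List.range n).map (fun i => [i])) = pvT n 1
    unfold pvStep pvT
    rw [List.flatMap_map]
    apply List.flatMap_congr
    intro i _
    show (List.range ([i].getLast! + 1)).map (fun j => [i] ++ [j])
        = ((List.range (i + 1)).map (fun j => [j])).map (fun t => i :: t)
    rw [List.map_map]
    rfl
  | succ k ih =>
    show pvStep (pvT n (k + 1)) = pvT n (k + 2)
    unfold pvStep
    rw [show pvT n (k + 1)
        = (List.range n).flatMap (fun i => (pvT (i + 1) k).map (fun t => i :: t)) from rfl]
    rw [List.flatMap_assoc]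
    rw [show pvT n (k + 2)
        = (List.range n).flatMap (fun i => (pvT (i + 1) (k + 1)).map (fun t => i :: t)) from rfl]
    apply List.flatMap_congr
    intro i _
    have h1 := pvStep_map_cons i (pvT (i + 1) k) (fun t ht => pvT_ne_nil ht)
    rw [ih] at h1
    simpa [pvStep] using h1

lemma pvFoldl_const {α β : Type} (f : α → α) (l : List β) (init : α) :
    l.foldl (fun s _ => f s) init = f^[l.length] init := by
  induction l generalizing init with
  | nil => rfl
  | cons b l ih => simp [List.foldl_cons, ih, Function.iterate_succ_apply]

lemma pvStep_iter (n k : Nat) : pvStep^[k] (pvT n 0) = pvT n k := by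
  induction k with
  | zero => rfl
  | succ k ih => rw [Function.iterate_succ_apply', ih, pvStep_pvT]

lemma pvGetD_range (xs : List Int) : (List.range xs.length).map (fun i => xs.getD i 0) = xs := by
  apply List.ext_getElem
  · simp
  · intro i h1 h2
    simp [List.getD_eq_getElem?_getD, List.getElem?_eq_getElem h2]

lemma pvGetD_take (xs : List Int) (m i : Nat) (h : i < m) :
    (xs.take m).getD i 0 = xs.getD i 0 := by
  simp [List.getD_eq_getElem?_getD, h]

lemma pvFlatMap_enumerate {β : Type} (xs : List Int) (s : Int) (g : Int × Int → List β) :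
    (PySem.List.enumerate xs s).flatMap g
      = (List.range xs.length).flatMap (fun j : Nat => g (s + (j : Int), xs.getD j 0)) := by
  induction xs generalizing s with
  | nil => simp [PySem.List.enumerate_nil]
  | cons x xs ih =>
    rw [PySem.List.enumerate_cons, List.flatMap_cons, ih (s + 1),
      List.length_cons, List.range_succ_eq_map, List.flatMap_cons, List.flatMap_map]
    congr 1
    · norm_num
    · apply List.flatMap_congr
      intro j _
      have h1 : s + 1 + (j : Int) = s + ((j + 1 : Nat) : Int) := by push_cast; ring
      rw [h1]
      rfl

-- A computes the mapped pvT table.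
lemma pvA_char (k : Nat) (values : List Int) :
    non_increasing values ((k : Int) + 1)
      = (pvT values.length k).map (fun t => t.map (fun i => values.getD i 0)) := by
  induction k generalizing values with
  | zero =>
    rw [non_increasing]
    norm_num
    conv_lhs => rw [← pvGetD_range values]
    rw [show pvT values.length 0 = (List.range values.length).map (fun i => [i]) from rfl]
    rw [List.map_map, List.map_map]
    rfl
  | succ k ih =>
    rw [non_increasing]
    have h1 : ¬(((k + 1 : Nat) : Int) + 1 = 1) := by push_cast; omega
    have h2 : ¬(((k + 1 : Nat) : Int) + 1 ≤ 1) := by push_cast; omega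
    rw [if_neg h1, if_neg h2]
    rw [pvFlatMap_enumerate values 1]
    rw [show pvT values.length (k + 1)
        = (List.range values.length).flatMap (fun i => (pvT (i + 1) k).map (fun t => i :: t))
      from rfl]
    rw [List.map_flatMap]
    apply List.flatMap_congr
    intro j hj
    have hj' : j < values.length := List.mem_range.mp hj
    have hs : PySem.List.slice values none (some (1 + (j : Int))) = values.take (j + 1) := by
      rw [show (1 : Int) + (j : Int) = ((j + 1 : Nat) : Int) by push_cast; ring]
      exact PySem.List.slice_to_natCast values (j + 1)
    have harg : ((k + 1 : Nat) : Int) + 1 - 1 = (k : Int) + 1 := by push_cast; ring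
    rw [hs, harg, ih (values.take (j + 1))]
    have hlen : (values.take (j + 1)).length = j + 1 := by
      simp [List.length_take]; omega
    rw [hlen, List.map_map, List.map_map]
    apply List.map_eq_map_iff.mpr
    intro t ht
    have hb := pvT_lt ht
    show values.getD j 0 :: t.map (fun i => (values.take (j + 1)).getD i 0)
        = values.getD j 0 :: t.map (fun i => values.getD i 0)
    congr 1
    apply List.map_eq_map_iff.mpr
    intro x hx
    exact pvGetD_take values (j + 1) x (hb x hx)

-- B computes the same mapped table when 1 ≤ length.
lemma pvB_char (values : List Int) (length : Int) (h : 1 ≤ length) :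
    non_increasing_alt values length
      = (pvT values.length (length - 1).toNat).map
          (fun t => t.map (fun i => values.getD i 0)) := by
  show ((PySem.List.pyRange 0 (length - 1) 1).foldl
      (fun ts _ => ts.flatMap (fun t => (List.range (t.getLast! + 1)).map (fun i => t ++ [i])))
      ((List.range values.length).map (fun i => [i]))).map _ = _
  rw [show (fun (ts : List (List Nat)) (_ : Int) =>
        ts.flatMap (fun t => (List.range (t.getLast! + 1)).map (fun i => t ++ [i])))
      = (fun ts _ => pvStep ts) from rfl]
  rw [pvFoldl_const, PySem.List.length_pyRange_one]
  rw [show (List.range values.length).map (fun i => [i]) = pvT values.length 0 from rfl]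
  rw [pvStep_iter]
  congr 2
  omega

-- ===== VERDICT (by name: the statement is the Claim_ definition above) =====
theorem non_increasing_spec : Claim_equal_non_increasing := by
  intro values length _ hpre
  unfold Spec_non_increasing
  by_cases h : 1 ≤ length
  · have hk : length = ((length - 1).toNat : Int) + 1 := by omega
    rw [pvB_char values length h]
    conv_lhs => rw [hk]
    rw [pvA_char]
  · have hv : values = [] := by
      rcases hpre with h1 | h1
      · omega
      · exact h1
    subst hv
    rw [non_increasing, non_increasing_alt]
    have h1 : ¬(length = 1) := by omega
    have h2 : length ≤ 1 := by omega
    simp [h1, h2]
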